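-- pv_equiv track=rewrite | github.com/alialinx/mail-tester | src/processor/service.py | get_dkim_content
-- ===== SOURCE A (Python) =====
-- def _as_raw_string(msg_or_raw) -> str:
--
--     if isinstance(msg_or_raw, str):
--         return msg_or_raw
--     if hasattr(msg_or_raw, "as_string"):
--         return msg_or_raw.as_string()
--     return str(msg_or_raw)
--
-- def get_dkim_content(msg_raw: str):
--     msg_raw = _as_raw_string(msg_raw)
--     msg_list = msg_raw.splitlines()
--
--     record_list = []
--     in_dkim = False
--
--     for line in msg_list:
--         if line == "":
--             break
--
--         if line.lower().startswith("dkim-signature:"):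
--             in_dkim = True
--             record_list.append(line)
--             continue
--
--         if in_dkim and line.startswith(("\t", " ")):
--             record_list.append(line)
--             continue
--
--         if in_dkim:
--             break
--
--     return record_list
-- ===== SOURCE B (Python) =====
-- def _group(lines):
--     # fold lines into logical headers: a start line plus its continuation lines
--     if not lines:
--         return []
--     k = 1
--     while k < len(lines) and lines[k].startswith(("\t", " ")):
--         k += 1
--     return [lines[:k]] + _group(lines[k:])
--
-- def _is_dkim(group):
--     return group[0].lower().startswith("dkim-signature:")
--
-- def get_dkim_content(msg_raw: str):
--     header = []
--     for line in msg_raw.splitlines():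
--         if line == "":
--             break
--         header.append(line)
--     groups = _group(header)
--     i = 0
--     while i < len(groups) and not _is_dkim(groups[i]):
--         i += 1
--     run = []
--     while i < len(groups) and _is_dkim(groups[i]):
--         run.extend(groups[i])
--         i += 1
--     return run
-- ===== Notes on version B (the rewrite author's own statement) =====
-- stated objective: alternative
-- what changed: A is one flag-driven loop over raw lines; B first truncates at the blank line, folds the header lines into logical-header groups (start line + continuations), then drops groups before the first DKIM-Signature group and flattens the contiguous run of DKIM groups.
import Mathlib
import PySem

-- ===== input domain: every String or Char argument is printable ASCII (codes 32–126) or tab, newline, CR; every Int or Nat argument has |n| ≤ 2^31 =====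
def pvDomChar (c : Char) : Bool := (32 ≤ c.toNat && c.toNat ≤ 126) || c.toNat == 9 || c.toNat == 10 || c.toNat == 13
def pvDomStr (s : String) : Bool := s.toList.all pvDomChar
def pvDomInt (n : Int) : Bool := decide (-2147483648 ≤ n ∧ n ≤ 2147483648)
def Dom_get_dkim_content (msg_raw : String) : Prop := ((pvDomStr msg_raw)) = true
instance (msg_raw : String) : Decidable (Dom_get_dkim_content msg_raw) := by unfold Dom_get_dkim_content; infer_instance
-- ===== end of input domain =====

-- B regroups the header into logical headers and takes the contiguous DKIM run; alternative decomposition, same cost.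

-- ===== PORT A =====
def pvDkimLine (l : String) : Bool := PySem.Str.startswith (PySem.Str.lower l) "dkim-signature:"
def pvIsCont (l : String) : Bool := PySem.Str.startswith l "\t" || PySem.Str.startswith l " "

-- the for-loop with `break`, state = (record_list, in_dkim)
def pvLoopA : List String → List String → Bool → List String
  | [], acc, _ => acc
  | l :: ls, acc, in_dkim =>
    if l = "" then acc
    else if pvDkimLine l then pvLoopA ls (acc ++ [l]) true
    else if in_dkim && pvIsCont l then pvLoopA ls (acc ++ [l]) in_dkim
    else if in_dkim then acc
    else pvLoopA ls acc in_dkim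

def get_dkim_content (msg_raw : String) : List String :=
  pvLoopA (PySem.Str.splitlines msg_raw) [] false

-- ===== PORT B =====
-- header section: lines up to the first empty line
def pvHeader : List String → List String
  | [] => []
  | l :: ls => if l = "" then [] else l :: pvHeader ls

-- _group: each logical header = start line ++ following continuation lines
def pvGroup : List String → List (List String)
  | [] => []
  | l :: ls => (l :: ls.takeWhile pvIsCont) :: pvGroup (ls.dropWhile pvIsCont)
  termination_by ls => ls.length
  decreasing_by have := List.length_dropWhile_le pvIsCont ls; simp; omega

-- _is_dkim on a group (groups are always nonempty)
def pvIsDkimG (g : List String) : Bool :=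
  match g with
  | [] => false
  | x :: _ => pvDkimLine x

-- first while loop: skip groups before the first DKIM group
def pvSkip : List (List String) → List (List String)
  | [] => []
  | g :: gs => if pvIsDkimG g then g :: gs else pvSkip gs

-- second while loop: flatten the contiguous run of DKIM groups
def pvRun : List (List String) → List String
  | [] => []
  | g :: gs => if pvIsDkimG g then g ++ pvRun gs else []

def get_dkim_content_alt (msg_raw : String) : List String :=
  pvRun (pvSkip (pvGroup (pvHeader (PySem.Str.splitlines msg_raw))))

-- ===== PRECONDITION & SPEC =====
def Spec_get_dkim_content (msg_raw : String) (out : List String) : Prop := out = get_dkim_content_alt msg_raw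
instance (msg_raw : String) (out : List String) : Decidable (Spec_get_dkim_content msg_raw out) := by unfold Spec_get_dkim_content; infer_instance

-- ===== CLAIM (what is proved, stated in full; the proofs are below) =====
def Claim_equal_get_dkim_content : Prop := ∀ (msg_raw : String), Dom_get_dkim_content msg_raw → Spec_get_dkim_content msg_raw (get_dkim_content msg_raw)

-- ===== LEMMAS AND PROOFS =====

-- accumulator-free version of A's loop
def pvFA : List String → Bool → List String
  | [], _ => []
  | l :: ls, b =>
    if l = "" then []
    else if pvDkimLine l then l :: pvFA ls true
    else if b && pvIsCont l then l :: pvFA ls b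
    else if b then []
    else pvFA ls false

-- pvFA with the ""-break already applied (runs on header lines)
def pvGA : List String → Bool → List String
  | [], _ => []
  | l :: ls, b =>
    if pvDkimLine l then l :: pvGA ls true
    else if b && pvIsCont l then l :: pvGA ls b
    else if b then []
    else pvGA ls false

lemma pv_cont_not_dkim (l : String) (h : pvIsCont l = true) : pvDkimLine l = false := by
  unfold pvIsCont pvDkimLine at *
  simp only [pysem, Bool.or_eq_true, PySem.Chars.startswith_iff] at h ⊢
  rw [Bool.eq_false_iff]
  intro hd
  rw [PySem.Chars.startswith_iff] at hd
  rcases h with h | h <;> obtain ⟨t, ht⟩ := h <;>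
    simp [show ("	").toList = ['	'] from rfl, show (" ").toList = [' '] from rfl] at ht <;>
    · obtain ⟨u, hu⟩ := hd
      rw [← ht] at hu
      simp [PySem.Chars.lower, show ("dkim-signature:").toList = 'd'::"kim-signature:".toList from rfl] at hu
      exact absurd hu.1 (by decide)

lemma pvLoopA_eq (ls : List String) : ∀ acc b, pvLoopA ls acc b = acc ++ pvFA ls b := by
  induction ls with
  | nil => intro acc b; simp [pvLoopA, pvFA]
  | cons l ls ih =>
    intro acc b
    simp only [pvLoopA, pvFA]
    split_ifs with h1 h2 h3 h4
    · simp
    · rw [ih]; simp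
    · rw [ih]; simp
    · simp
    · have hb : b = false := by revert h4; cases b <;> simp
      rw [hb]; exact ih acc false

lemma pvFA_header (ls : List String) : ∀ b, pvFA ls b = pvGA (pvHeader ls) b := by
  induction ls with
  | nil => intro b; simp [pvFA, pvHeader, pvGA]
  | cons l ls ih =>
    intro b
    simp only [pvFA, pvHeader]
    by_cases h1 : l = ""
    · simp [h1, pvGA]
    · simp only [if_neg h1, pvGA]
      split_ifs <;> simp [ih]

lemma pv_dkim_not_cont (l : String) (h : pvDkimLine l = true) : pvIsCont l = false := by
  cases hc : pvIsCont l
  · rfl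
  · exact absurd h (by simp [pv_cont_not_dkim l hc])

lemma pvGA_true : ∀ n (ls : List String), ls.length ≤ n →
    pvGA ls true = ls.takeWhile pvIsCont ++ pvRun (pvGroup (ls.dropWhile pvIsCont)) := by
  intro n
  induction n with
  | zero =>
    intro ls h
    have : ls = [] := List.eq_nil_of_length_eq_zero (Nat.le_zero.mp h)
    subst this; simp [pvGA, pvGroup, pvRun]
  | succ n ih =>
    intro ls h
    match ls with
    | [] => simp [pvGA, pvGroup, pvRun]
    | l :: ls' =>
      have hlen : ls'.length ≤ n := by simpa using h
      by_cases hd : pvDkimLine l = true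
      · have hc := pv_dkim_not_cont l hd
        simp only [pvGA, hd, if_pos, List.takeWhile_cons, List.dropWhile_cons, hc,
          Bool.false_eq_true, if_false]
        rw [ih ls' hlen]
        simp [pvGroup, pvRun, pvIsDkimG, hd]
      · by_cases hcont : pvIsCont l = true
        · simp only [pvGA, hd, Bool.false_eq_true, if_false, Bool.true_and, hcont, if_pos,
            List.takeWhile_cons, List.dropWhile_cons]
          rw [ih ls' hlen]
          simp
        · simp [pvGA, hd, hcont,
            pvGroup, pvRun, pvIsDkimG]

lemma pvGA_false_skip : ∀ (cs rest : List String), (∀ c ∈ cs, pvIsCont c = true) →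
    pvGA (cs ++ rest) false = pvGA rest false := by
  intro cs
  induction cs with
  | nil => intro rest _; simp
  | cons c cs ih =>
    intro rest h
    have hc : pvIsCont c = true := h c (by simp)
    have hd : pvDkimLine c = false := pv_cont_not_dkim c hc
    simp only [List.cons_append, pvGA, hd, Bool.false_eq_true, if_false, Bool.false_and]
    exact ih rest (fun x hx => h x (by simp [hx]))

lemma pvGA_false : ∀ n (ls : List String), ls.length ≤ n →
    pvGA ls false = pvRun (pvSkip (pvGroup ls)) := by
  intro n
  induction n with
  | zero =>
    intro ls h
    have : ls = [] := List.eq_nil_of_length_eq_zero (Nat.le_zero.mp h)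
    subst this; simp [pvGA, pvGroup, pvSkip, pvRun]
  | succ n ih =>
    intro ls h
    match ls with
    | [] => simp [pvGA, pvGroup, pvSkip, pvRun]
    | l :: ls' =>
      have hlen : ls'.length ≤ n := by simpa using h
      by_cases hd : pvDkimLine l = true
      · simp only [pvGA, hd, if_pos]
        rw [pvGA_true n ls' hlen]
        simp [pvGroup, pvSkip, pvRun, pvIsDkimG, hd]
      · simp only [pvGA, hd, Bool.false_eq_true, if_false, Bool.false_and]
        rw [← List.takeWhile_append_dropWhile (p := pvIsCont) (l := ls'),
          pvGA_false_skip _ _ (fun c hc => List.mem_takeWhile_imp hc),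
          ih _ (le_trans (List.length_dropWhile_le _ _) hlen)]
        simp [pvGroup, pvSkip, pvIsDkimG, hd]

-- ===== VERDICT (by name: the statement is the Claim_ definition above) =====
theorem get_dkim_content_spec : Claim_equal_get_dkim_content := by
  intro msg _
  unfold Spec_get_dkim_content get_dkim_content get_dkim_content_alt
  rw [pvLoopA_eq, pvFA_header, pvGA_false _ _ le_rfl]
  rfl
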